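-- pv_equiv track=rewrite | github.com/pbrehaut/FW_Forms_pub | generate_flow_diagrams.py | convert_mermaid_to_dot
-- ===== SOURCE A (Python) =====
-- def convert_mermaid_to_dot(mermaid_input, title=None, node_type_map=None):
--     """
--     Convert Mermaid flowchart syntax to DOT format for Graphviz
--
--     Args:
--         mermaid_input (str): Input string in Mermaid flowchart format
--         title (str, optional): Title to be displayed on the graph. Defaults to None.
--         node_type_map (dict, optional): Mapping of node names to their types for shape determination
--
--     Returns:
--         str: Converted flowchart in DOT format
--     """
--     # Define node type shapes (same as in create_network_diagram)
--     default_node_type_shape_map = {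
--         'firewall': 'box',
--         'router': 'diamond',
--         'zone': 'ellipse',
--         'server': 'oval'
--     }
--
--     # Split input into lines and remove empty lines
--     lines = [line.strip() for line in mermaid_input.split('\n') if line.strip()]
--
--     # Skip the first line (flowchart LR)
--     connection_lines = lines[1:]
--
--     # Track node connections
--     node_connections = {}
--     connections = []
--
--     for line in connection_lines:
--         # Split on arrow syntax
--         parts = line.split('<-->')
--         if len(parts) == 2:
--             node1 = parts[0].strip()
--             node2 = parts[1].strip()
--
--             # Count connections for each node
--             node_connections[node1] = node_connections.get(node1, 0) + 1
--             node_connections[node2] = node_connections.get(node2, 0) + 1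
--
--             connections.append((node1, node2))
--
--     # Build DOT format output
--     dot_output = ['digraph network_diagram {', '    rankdir=LR;  // Left to right layout',
--                   '    bgcolor="#F0F8FF";  // Light blue background']
--
--     # Add title if provided
--     if title:
--         dot_output.append(f'    label="{title}";')
--         dot_output.append('    labelloc="t";  // Place title at top')
--         dot_output.append('    fontsize=16;')
--
--     # Add node definitions
--     dot_output.append('    // Define nodes with appropriate formatting')
--
--     for node in sorted(node_connections.keys()):
--         node_formatted = node.replace('-', '_')  # Replace hyphens with underscores
--
--         # Default values
--         node_shape = 'box'
--         node_fillcolor = '#FF9933'  # Orange - default color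
--         node_color = '#994C00'  # Dark orange border - default
--
--         # Apply node type mapping if available
--         if node_type_map and node in node_type_map:
--             node_type = node_type_map[node]
--             node_shape = default_node_type_shape_map.get(node_type, 'box')
--
--         dot_output.append(
--             f'    {node_formatted} [label="{node}", shape={node_shape}, style=filled, fillcolor="{node_fillcolor}", color="{node_color}"];')
--
--     # Add connections
--     dot_output.append('    // Define bidirectional connections')
--     for node1, node2 in connections:
--         node1_formatted = node1.replace('-', '_')
--         node2_formatted = node2.replace('-', '_')
--         dot_output.append(f'    {node1_formatted} -> {node2_formatted} [dir=both, color="#994C00"];')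
--
--     dot_output.append('}')
--
--     return '\n'.join(dot_output)
-- ===== SOURCE B (Python) =====
-- def convert_mermaid_to_dot(mermaid_input, title=None, node_type_map=None):
--     """Mermaid flowchart -> DOT in one streaming pass: no lines list/slice, no
--     node dict, no sorted() call -- a header-skip flag, edge lines formatted as
--     they are parsed, and the node list kept sorted+unique by in-place insertion."""
--     shape_of = {'firewall': 'box', 'router': 'diamond', 'zone': 'ellipse', 'server': 'oval'}
--
--     nodes = []        # invariant: strictly increasing (sorted, no duplicates)
--     edge_lines = []
--     seen_header = False
--     for raw in mermaid_input.split('\n'):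
--         line = raw.strip()
--         if not line:
--             continue
--         if not seen_header:          # skip the first non-empty line (flowchart LR)
--             seen_header = True
--             continue
--         parts = line.split('<-->')
--         if len(parts) != 2:
--             continue
--         a, b = parts[0].strip(), parts[1].strip()
--         for n in (a, b):
--             i = 0
--             while i < len(nodes) and nodes[i] < n:
--                 i += 1
--             if i == len(nodes) or nodes[i] != n:
--                 nodes.insert(i, n)
--         edge_lines.append('    {} -> {} [dir=both, color="#994C00"];'.format(
--             a.replace('-', '_'), b.replace('-', '_')))
--
--     out = ['digraph network_diagram {',
--            '    rankdir=LR;  // Left to right layout',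
--            '    bgcolor="#F0F8FF";  // Light blue background']
--     if title:
--         out.append('    label="%s";' % title)
--         out.append('    labelloc="t";  // Place title at top')
--         out.append('    fontsize=16;')
--     out.append('    // Define nodes with appropriate formatting')
--     for n in nodes:
--         shape = 'box'
--         if node_type_map and n in node_type_map:
--             shape = shape_of.get(node_type_map[n], 'box')
--         out.append('    {} [label="{}", shape={}, style=filled, fillcolor="#FF9933", color="#994C00"];'.format(
--             n.replace('-', '_'), n, shape))
--     out.append('    // Define bidirectional connections')
--     out += edge_lines
--     out.append('}')
--     return '\n'.join(out)
-- ===== Notes on version B (the rewrite author's own statement) =====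
-- stated objective: alternative
-- what changed: B replaces A's staged passes (strip all lines into a list, slice off the header, count nodes in a dict, then sorted(dict.keys())) by a single streaming pass over the raw lines with a header-skip flag, in which edge lines are formatted as they are parsed and the node list is kept sorted and duplicate-free by ordered insertion, so no dict, no set and no sort call exist.
import Mathlib
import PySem

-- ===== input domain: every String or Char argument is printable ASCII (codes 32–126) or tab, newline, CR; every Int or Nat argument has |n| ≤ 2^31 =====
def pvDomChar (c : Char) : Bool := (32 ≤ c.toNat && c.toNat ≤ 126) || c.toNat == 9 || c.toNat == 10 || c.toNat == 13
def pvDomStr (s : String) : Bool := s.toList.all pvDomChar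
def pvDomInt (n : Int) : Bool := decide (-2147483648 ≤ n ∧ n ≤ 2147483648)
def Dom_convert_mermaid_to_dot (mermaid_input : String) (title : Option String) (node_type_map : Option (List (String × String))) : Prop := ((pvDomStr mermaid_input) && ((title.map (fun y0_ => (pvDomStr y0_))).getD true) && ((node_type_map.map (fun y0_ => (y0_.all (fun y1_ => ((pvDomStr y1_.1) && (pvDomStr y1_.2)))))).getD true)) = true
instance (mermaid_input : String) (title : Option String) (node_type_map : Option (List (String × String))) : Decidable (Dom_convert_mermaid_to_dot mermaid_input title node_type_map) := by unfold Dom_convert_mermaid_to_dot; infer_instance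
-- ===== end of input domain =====

-- B is a single streaming pass over the raw lines: no stripped-lines list or slice (a
-- header-skip flag instead), no node dict and no sort call (the node list is kept
-- sorted and duplicate-free by ordered insertion), and edge lines are formatted while
-- parsing (objective: alternative).

-- ===== PORT A =====
-- helpers for code that is literally identical in both Pythons:
-- the shape table and the shape branch
def pvShapeMap : List (String × String) :=
  [("firewall", "box"), ("router", "diamond"), ("zone", "ellipse"), ("server", "oval")]

-- 'if node_type_map and node in node_type_map: shape = default_map.get(node_type_map[node], "box")'
def pvShape (node_type_map : Option (List (String × String))) (node : String) : String :=
  match node_type_map with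
  | none => "box"
  | some m =>
      if m ≠ [] ∧ (m.lookup node).isSome then
        (pvShapeMap.lookup ((m.lookup node).getD "")).getD "box"
      else "box"

-- A's '[line.strip() for line in mermaid_input.split('\n') if line.strip()]',
-- factored over the split line list
def pvStrippedOf (raws : List String) : List String :=
  raws.filterMap (fun line =>
    let s := PySem.Str.strip line
    if s = "" then none else some s)

def pvStripLines (mermaid_input : String) : List String :=
  pvStrippedOf ((PySem.Str.split? mermaid_input "\n").getD [])

-- loop body of A's parse loop: count both endpoints in the dict, append the pair
def pvStepA (st : PySem.Dict String Int × List (String × String)) (line : String) :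
    PySem.Dict String Int × List (String × String) :=
  let parts := (PySem.Str.split? line "<-->").getD []
  if parts.length = 2 then
    let node1 := PySem.Str.strip (PySem.List.pyGetD parts 0 "")
    let node2 := PySem.Str.strip (PySem.List.pyGetD parts 1 "")
    let d1 := st.1.insert node1 (st.1.getD node1 0 + 1)
    let d2 := d1.insert node2 (d1.getD node2 0 + 1)
    (d2, st.2 ++ [(node1, node2)])
  else st

def convert_mermaid_to_dot (mermaid_input : String) (title : Option String) (node_type_map : Option (List (String × String))) : String :=
  let lines := pvStripLines mermaid_input
  let connection_lines := PySem.List.slice lines (some 1) none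
  let st := connection_lines.foldl pvStepA (PySem.Dict.empty, [])
  let node_connections := st.1
  let connections := st.2
  let dot_output : List String :=
    ["digraph network_diagram {", "    rankdir=LR;  // Left to right layout",
     "    bgcolor=\"#F0F8FF\";  // Light blue background"]
  let dot_output :=
    match title with
    | none => dot_output
    | some t =>
        if t ≠ "" then
          dot_output ++ ["    label=\"" ++ t ++ "\";",
                         "    labelloc=\"t\";  // Place title at top", "    fontsize=16;"]
        else dot_output
  let dot_output := dot_output ++ ["    // Define nodes with appropriate formatting"]
  let dot_output :=
    (PySem.List.sorted node_connections.keys (fun x => x) false).foldl (fun acc node =>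
      let node_formatted := PySem.Str.replace node "-" "_"
      let node_shape := pvShape node_type_map node
      acc ++ ["    " ++ node_formatted ++ " [label=\"" ++ node ++ "\", shape=" ++ node_shape ++
              ", style=filled, fillcolor=\"#FF9933\", color=\"#994C00\"];"]) dot_output
  let dot_output := dot_output ++ ["    // Define bidirectional connections"]
  let dot_output :=
    connections.foldl (fun acc (p : String × String) =>
      acc ++ ["    " ++ PySem.Str.replace p.1 "-" "_" ++ " -> " ++ PySem.Str.replace p.2 "-" "_" ++
              " [dir=both, color=\"#994C00\"];"]) dot_output
  PySem.Str.join "\n" (dot_output ++ ["}"])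

-- ===== PORT B =====
-- Source B's inner loop 'i = 0; while i < len(nodes) and nodes[i] < n: i += 1;
-- insert at i if absent', as the obvious structural recursion on the sorted list
def pvInsert : List String → String → List String
  | [], n => [n]
  | x :: xs, n =>
      if x < n then x :: pvInsert xs n
      else if x ≠ n then n :: x :: xs
      else x :: xs

def pvEdgeLine (a b : String) : String :=
  "    " ++ PySem.Str.replace a "-" "_" ++ " -> " ++ PySem.Str.replace b "-" "_" ++
  " [dir=both, color=\"#994C00\"];"

-- body of Source B's loop after the empty/header skips: parse one connection line
def pvStepC (st : List String × List String) (line : String) :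
    List String × List String :=
  let parts := (PySem.Str.split? line "<-->").getD []
  if parts.length ≠ 2 then st
  else
    let a := PySem.Str.strip (PySem.List.pyGetD parts 0 "")
    let b := PySem.Str.strip (PySem.List.pyGetD parts 1 "")
    (pvInsert (pvInsert st.1 a) b, st.2 ++ [pvEdgeLine a b])

-- loop body of Source B's single pass; state = (seen_header, (nodes, edge_lines))
def pvStepB (st : Bool × List String × List String) (raw : String) :
    Bool × List String × List String :=
  let line := PySem.Str.strip raw
  if line = "" then st
  else if st.1 = false then (true, st.2)   -- first non-empty line: set flag, skip it
  else (true, pvStepC st.2 line)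

def convert_mermaid_to_dot_alt (mermaid_input : String) (title : Option String) (node_type_map : Option (List (String × String))) : String :=
  let st := ((PySem.Str.split? mermaid_input "\n").getD []).foldl pvStepB (false, [], [])
  let out : List String :=
    ["digraph network_diagram {", "    rankdir=LR;  // Left to right layout",
     "    bgcolor=\"#F0F8FF\";  // Light blue background"]
  let out :=
    match title with
    | none => out
    | some t =>
        if t ≠ "" then
          out ++ ["    label=\"" ++ t ++ "\";",
                  "    labelloc=\"t\";  // Place title at top", "    fontsize=16;"]
        else out
  let out := out ++ ["    // Define nodes with appropriate formatting"]
  let out := out ++ st.2.1.map (fun n =>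
    "    " ++ PySem.Str.replace n "-" "_" ++ " [label=\"" ++ n ++ "\", shape=" ++
    pvShape node_type_map n ++ ", style=filled, fillcolor=\"#FF9933\", color=\"#994C00\"];")
  let out := out ++ ["    // Define bidirectional connections"] ++ st.2.2 ++ ["}"]
  PySem.Str.join "\n" out

-- ===== PRECONDITION & SPEC =====
def Spec_convert_mermaid_to_dot (mermaid_input : String) (title : Option String) (node_type_map : Option (List (String × String))) (out : String) : Prop := out = convert_mermaid_to_dot_alt mermaid_input title node_type_map
instance (mermaid_input : String) (title : Option String) (node_type_map : Option (List (String × String))) (out : String) : Decidable (Spec_convert_mermaid_to_dot mermaid_input title node_type_map out) := by unfold Spec_convert_mermaid_to_dot; infer_instance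

-- ===== CLAIM (what is proved, stated in full; the proofs are below) =====
def Claim_equal_convert_mermaid_to_dot : Prop := ∀ (mermaid_input : String) (title : Option String) (node_type_map : Option (List (String × String))), Dom_convert_mermaid_to_dot mermaid_input title node_type_map → Spec_convert_mermaid_to_dot mermaid_input title node_type_map (convert_mermaid_to_dot mermaid_input title node_type_map)

-- ===== LEMMAS AND PROOFS =====

-- the parsed (node1, node2) pairs of the stripped connection lines (proof vehicle)
def pvParse (lines : List String) : List (String × String) :=
  lines.filterMap (fun line =>
    let parts := (PySem.Str.split? line "<-->").getD []
    if parts.length = 2 then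
      some (PySem.Str.strip (PySem.List.pyGetD parts 0 ""),
            PySem.Str.strip (PySem.List.pyGetD parts 1 ""))
    else none)

-- inserting a key adds it to the key set
theorem pv_keys_insert_add (d : PySem.Dict String Int) (k : String) (v : Int) :
    (d.insert k v).keys = PySem.Set.add d.keys k := by
  by_cases h : d.contains k
  · rw [PySem.Dict.keys_insert_of_contains _ v h, PySem.Set.add]
    have hm : k ∈ d.keys := (PySem.Dict.contains_iff_mem_keys _ _).mp h
    simp [hm]
  · rw [PySem.Dict.keys_insert_of_not_contains _ v (by simpa using h), PySem.Set.add]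
    have hm : k ∉ d.keys := fun hm => h ((PySem.Dict.contains_iff_mem_keys _ _).mpr hm)
    simp [hm]

-- the pair accumulator of A's loop is exactly the parsed pairs
theorem pv_foldA_snd (lines : List String) (d : PySem.Dict String Int)
    (c : List (String × String)) :
    (lines.foldl pvStepA (d, c)).2 = c ++ pvParse lines := by
  induction lines generalizing d c with
  | nil => simp [pvParse]
  | cons line rest ih =>
      simp only [List.foldl_cons, pvStepA, pvParse, List.filterMap_cons]
      split
      · rw [ih]; simp [pvParse]
      · rw [ih]; simp [pvParse]

-- the key set of A's counting dict is the node set of the parsed pairs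
theorem pv_foldA_keys (lines : List String) (d : PySem.Dict String Int)
    (c : List (String × String)) :
    (lines.foldl pvStepA (d, c)).1.keys =
      PySem.Set.update d.keys ((pvParse lines).flatMap (fun p => [p.1, p.2])) := by
  induction lines generalizing d c with
  | nil => simp [pvParse, PySem.Set.update]
  | cons line rest ih =>
      simp only [List.foldl_cons, pvStepA, pvParse, List.filterMap_cons]
      split
      · rw [ih]
        simp [pvParse, PySem.Set.update, pv_keys_insert_add]
      · rw [ih]; simp [pvParse]

-- pvInsert: membership
theorem pv_mem_insert (s : List String) (n x : String) :
    x ∈ pvInsert s n ↔ x = n ∨ x ∈ s := by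
  induction s with
  | nil => simp [pvInsert]
  | cons y ys ih =>
      simp only [pvInsert]
      split_ifs with h1 h2
      · simp [ih]; tauto
      · simp
      · have hyn : y = n := not_not.mp h2
        subst hyn; simp

-- pvInsert preserves strict sortedness
theorem pv_insert_pairwise (s : List String) (n : String) (hs : s.Pairwise (· < ·)) :
    (pvInsert s n).Pairwise (· < ·) := by
  induction s with
  | nil => simp [pvInsert]
  | cons y ys ih =>
      rcases List.pairwise_cons.mp hs with ⟨hy, hys⟩
      simp only [pvInsert]
      split_ifs with h1 h2
      · exact List.pairwise_cons.mpr ⟨fun b hb => by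
          rcases (pv_mem_insert ys n b).mp hb with rfl | hb
          · exact h1
          · exact hy b hb, ih hys⟩
      · have hn : n < y := lt_of_le_of_ne (not_lt.mp h1) (fun h => h2 h.symm)
        exact List.pairwise_cons.mpr ⟨fun b hb => by
          rcases List.mem_cons.mp hb with rfl | hb
          · exact hn
          · exact hn.trans (hy b hb), hs⟩
      · exact hs

-- fold of pvInsert over a word list, from the empty accumulator, is sorted(set(...))
theorem pv_fold_insert_sorted (xs : List String) :
    xs.foldl pvInsert [] = PySem.List.sorted (PySem.Set.ofList xs) (fun x => x) false := by
  have key : ∀ (xs : List String) (s : List String), s.Pairwise (· < ·) →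
      (xs.foldl pvInsert s).Pairwise (· < ·) ∧
      (∀ x, x ∈ xs.foldl pvInsert s ↔ x ∈ s ∨ x ∈ xs) := by
    intro xs
    induction xs with
    | nil => intro s hs; exact ⟨hs, by simp⟩
    | cons a rest ih =>
        intro s hs
        rcases ih (pvInsert s a) (pv_insert_pairwise s a hs) with ⟨hp, hm⟩
        refine ⟨hp, fun x => ?_⟩
        rw [List.foldl_cons] at *
        rw [hm x, pv_mem_insert]
        simp; tauto
  rcases key xs [] (by simp) with ⟨hp, hm⟩
  symm
  apply PySem.List.sorted_eq_of_perm_of_pairwise_lt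
  · apply (List.perm_ext_iff_of_nodup ?_ ?_).mpr
    · intro x
      rw [hm x, PySem.Set.mem_ofList]
      simp
    · exact hp.imp (fun h => ne_of_lt h)
    · exact PySem.Set.nodup_ofList xs
  · exact hp

-- B's fold with the flag already set processes exactly the stripped lines
theorem pv_foldB_true (raws : List String) (st : List String × List String) :
    raws.foldl pvStepB (true, st) = (true, (pvStrippedOf raws).foldl pvStepC st) := by
  induction raws generalizing st with
  | nil => simp [pvStrippedOf]
  | cons raw rest ih =>
      simp only [List.foldl_cons, pvStepB, pvStrippedOf, List.filterMap_cons]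
      by_cases h : PySem.Str.strip raw = ""
      · simp only [h, reduceIte]
        exact ih st
      · simp only [h, reduceIte, Bool.true_eq_false]
        rw [ih (pvStepC st (PySem.Str.strip raw))]
        simp [pvStrippedOf]

-- B's full fold (flag initially clear) skips the first stripped line
theorem pv_foldB_false (raws : List String) (st : List String × List String) :
    (raws.foldl pvStepB (false, st)).2 = ((pvStrippedOf raws).tail).foldl pvStepC st := by
  induction raws generalizing st with
  | nil => simp [pvStrippedOf]
  | cons raw rest ih =>
      simp only [List.foldl_cons, pvStepB, pvStrippedOf, List.filterMap_cons]
      by_cases h : PySem.Str.strip raw = ""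
      · simp only [h, reduceIte]
        exact ih st
      · simp only [h, reduceIte]
        rw [pv_foldB_true rest st]
        simp [pvStrippedOf]

-- the edge-line accumulator of B's parse fold
theorem pv_foldC_snd (lines : List String) (ns es : List String) :
    (lines.foldl pvStepC (ns, es)).2 =
      es ++ (pvParse lines).map (fun p => pvEdgeLine p.1 p.2) := by
  induction lines generalizing ns es with
  | nil => simp [pvParse]
  | cons line rest ih =>
      simp only [List.foldl_cons, pvStepC, pvParse, List.filterMap_cons]
      split
      · rw [ih]
        simp_all [pvParse]
      · rw [ih]
        simp_all [pvParse]

-- the node accumulator of B's parse fold is a pvInsert fold over the pair endpoints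
theorem pv_foldC_fst (lines : List String) (ns es : List String) :
    (lines.foldl pvStepC (ns, es)).1 =
      ((pvParse lines).flatMap (fun p => [p.1, p.2])).foldl pvInsert ns := by
  induction lines generalizing ns es with
  | nil => simp [pvParse]
  | cons line rest ih =>
      simp only [List.foldl_cons, pvStepC, pvParse, List.filterMap_cons]
      split
      · rw [ih]
        simp_all [pvParse]
      · rw [ih]
        simp_all [pvParse]

-- ===== VERDICT (by name: the statement is the Claim_ definition above) =====
theorem convert_mermaid_to_dot_spec : Claim_equal_convert_mermaid_to_dot := by
  intro mermaid_input title node_type_map _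
  simp only [Spec_convert_mermaid_to_dot, convert_mermaid_to_dot, convert_mermaid_to_dot_alt]
  rw [pv_foldA_snd, pv_foldA_keys, pv_foldB_false, pv_foldC_snd, pv_foldC_fst,
    pv_fold_insert_sorted, PySem.List.slice_from_one]
  have hofl : ∀ xs : List String, PySem.Set.update (PySem.Dict.empty (κ := String) (ν := Int)).keys xs = PySem.Set.ofList xs := by
    intro xs; rfl
  rw [hofl]
  simp only [List.nil_append, PySem.List.foldl_append_singleton_eq_map, pvStripLines, pvEdgeLine]
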